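-- pv_equiv track=rewrite | github.com/h324yang/ICE_tools | utils/gen_tt.py | add_prefix
-- ===== SOURCE A (Python) =====
-- def add_prefix(edgelist, prefix1, prefix2):
--     res = ""
--     for i, elem in enumerate(edgelist.split()):
--         if i%3 == 0:
--             res += "%s%s "%(prefix1, elem)
--         elif i%3 == 1:
--             res += "%s%s "%(prefix2, elem)
--         else:
--             res += "%s\n"%elem
--     return res
-- ===== SOURCE B (Python) =====
-- def add_prefix(edgelist, prefix1, prefix2):
--     toks = edgelist.split()
--     parts = []
--     for j in range(0, len(toks), 3):
--         group = toks[j:j+3]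
--         parts.append("%s%s " % (prefix1, group[0]))
--         if len(group) > 1:
--             parts.append("%s%s " % (prefix2, group[1]))
--         if len(group) > 2:
--             parts.append("%s\n" % group[2])
--     return "".join(parts)
-- ===== Notes on version B (the rewrite author's own statement) =====
-- stated objective: alternative
-- what changed: Splits once and walks the token list in chunks of three, emitting each edge-group's pieces into a list joined at the end, replacing the flat enumerate loop with i%3 dispatch and repeated string concatenation.
import Mathlib
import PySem

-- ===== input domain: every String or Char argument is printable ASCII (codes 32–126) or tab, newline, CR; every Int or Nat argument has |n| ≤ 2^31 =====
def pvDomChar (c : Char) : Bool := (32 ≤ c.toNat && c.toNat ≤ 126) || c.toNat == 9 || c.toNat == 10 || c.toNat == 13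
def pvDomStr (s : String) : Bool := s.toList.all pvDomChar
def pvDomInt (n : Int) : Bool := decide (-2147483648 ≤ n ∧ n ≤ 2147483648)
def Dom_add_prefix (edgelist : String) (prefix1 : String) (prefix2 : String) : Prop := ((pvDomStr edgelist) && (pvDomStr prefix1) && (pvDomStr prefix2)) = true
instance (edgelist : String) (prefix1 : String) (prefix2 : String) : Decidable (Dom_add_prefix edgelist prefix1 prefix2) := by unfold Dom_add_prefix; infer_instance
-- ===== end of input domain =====

-- B reformats the edgelist by walking the tokens in chunks of three (one edge at a time)
-- instead of A's flat enumerate loop with an i%3 dispatch; same return value, alternative decomposition.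

-- ===== PORT A =====
-- strings are handled as code-point lists (exact: String.toList / String.ofList), the loop is the foldl over enumerate(split())
def add_prefix (edgelist : String) (prefix1 : String) (prefix2 : String) : String :=
  String.ofList ((PySem.List.enumerate (PySem.Str.split₀ edgelist) 0).foldl
    (fun res p =>
      if PySem.Int.mod p.1 3 == 0 then res ++ prefix1.toList ++ p.2.toList ++ [' ']
      else if PySem.Int.mod p.1 3 == 1 then res ++ prefix2.toList ++ p.2.toList ++ [' ']
      else res ++ p.2.toList ++ ['\n']) [])

-- ===== PORT B =====
-- the chunked pass of Source B: each round takes one group of up to three tokens and emits its pieces;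
-- ''.join of the collected pieces is List.flatten on code-point lists (exact)
def addPrefixChunks (p1 p2 : List Char) : List String → List (List Char)
  | [] => []
  | [a] => [p1 ++ a.toList ++ [' ']]
  | [a, b] => [p1 ++ a.toList ++ [' '], p2 ++ b.toList ++ [' ']]
  | a :: b :: c :: rest =>
      (p1 ++ a.toList ++ [' ']) :: (p2 ++ b.toList ++ [' ']) :: (c.toList ++ ['\n'])
        :: addPrefixChunks p1 p2 rest

def add_prefix_alt (edgelist : String) (prefix1 : String) (prefix2 : String) : String :=
  String.ofList (List.flatten (addPrefixChunks prefix1.toList prefix2.toList (PySem.Str.split₀ edgelist)))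

-- ===== PRECONDITION & SPEC =====
def Spec_add_prefix (edgelist : String) (prefix1 : String) (prefix2 : String) (out : String) : Prop := out = add_prefix_alt edgelist prefix1 prefix2
instance (edgelist : String) (prefix1 : String) (prefix2 : String) (out : String) : Decidable (Spec_add_prefix edgelist prefix1 prefix2 out) := by unfold Spec_add_prefix; infer_instance

-- ===== CLAIM (what is proved, stated in full; the proofs are below) =====
def Claim_equal_add_prefix : Prop := ∀ (edgelist : String) (prefix1 : String) (prefix2 : String), Dom_add_prefix edgelist prefix1 prefix2 → Spec_add_prefix edgelist prefix1 prefix2 (add_prefix edgelist prefix1 prefix2)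

-- ===== LEMMAS AND PROOFS =====

theorem mod3_0 (k : Nat) : PySem.Int.mod (3 * (k : Int)) 3 = 0 := by
  simp [PySem.Int.mod]

theorem mod3_1 (k : Nat) : PySem.Int.mod (3 * (k : Int) + 1) 3 = 1 := by
  simp [PySem.Int.mod]

theorem mod3_2 (k : Nat) : PySem.Int.mod (3 * (k : Int) + 1 + 1) 3 = 2 := by
  simp [PySem.Int.mod, Int.fmod_eq_emod]; omega

theorem add_prefix_loop (p1 p2 : List Char) (toks : List String) (k : Nat) (res : List Char) :
    (PySem.List.enumerate toks (3 * (k : Int))).foldl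
      (fun res p =>
        if PySem.Int.mod p.1 3 == 0 then res ++ p1 ++ p.2.toList ++ [' ']
        else if PySem.Int.mod p.1 3 == 1 then res ++ p2 ++ p.2.toList ++ [' ']
        else res ++ p.2.toList ++ ['\n']) res
    = res ++ (addPrefixChunks p1 p2 toks).flatten := by
  induction toks using addPrefixChunks.induct generalizing k res with
  | case1 => simp [PySem.List.enumerate, addPrefixChunks]
  | case2 a =>
      simp [PySem.List.enumerate, addPrefixChunks]
  | case3 a b =>
      simp [PySem.List.enumerate, addPrefixChunks]
  | case4 a b c rest ih =>
      have hnext : (3 * (k : Int) + 1 + 1 + 1) = 3 * ((k + 1 : Nat) : Int) := by push_cast; ring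
      simp only [PySem.List.enumerate_cons, List.foldl_cons, mod3_0, mod3_1, mod3_2, hnext, ih,
        addPrefixChunks, List.flatten_cons]
      simp

-- ===== VERDICT (by name: the statement is the Claim_ definition above) =====
theorem add_prefix_spec : Claim_equal_add_prefix := by
  intro e p1 p2 _
  unfold Spec_add_prefix add_prefix add_prefix_alt
  have := add_prefix_loop p1.toList p2.toList (PySem.Str.split₀ e) 0 []
  simp only [Nat.cast_zero, mul_zero] at this
  rw [this]
  simp
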